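-- pv_equiv track=rewrite | github.com/journich/Altair-C-Basic | compatibility_tests/hamurabi_test/run_hamurabi_test.py | strip_banner
-- ===== SOURCE A (Python) =====
-- def strip_banner(output):
--     """Strip the C interpreter banner from output."""
--     # Remove bell characters (CHR$(7)) - both interpreters output them,
--     # but SIMH terminal doesn't pass them through to capture
--     output = output.replace('\x07', '')
--
--     lines = output.split('\n')
--     result = []
--     started = False
--     for line in lines:
--         if 'HAMURABI' in line and not started:
--             started = True
--         if started:
--             result.append(line)
--     return '\n'.join(result)
-- ===== SOURCE B (Python) =====
-- def strip_banner(output):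
--     """Strip the C interpreter banner from output."""
--     output = output.replace('\x07', '')
--     lines = output.split('\n')
--     # drop the banner prefix: everything before the first line containing the marker
--     while lines and 'HAMURABI' not in lines[0]:
--         lines = lines[1:]
--     return '\n'.join(lines)
-- ===== Notes on version B (the rewrite author's own statement) =====
-- stated objective: simpler
-- what changed: Replaces the boolean flag and gated per-line accumulator with a drop-the-prefix decomposition: discard lines until the first one containing the marker, then join the remainder.
import Mathlib
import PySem

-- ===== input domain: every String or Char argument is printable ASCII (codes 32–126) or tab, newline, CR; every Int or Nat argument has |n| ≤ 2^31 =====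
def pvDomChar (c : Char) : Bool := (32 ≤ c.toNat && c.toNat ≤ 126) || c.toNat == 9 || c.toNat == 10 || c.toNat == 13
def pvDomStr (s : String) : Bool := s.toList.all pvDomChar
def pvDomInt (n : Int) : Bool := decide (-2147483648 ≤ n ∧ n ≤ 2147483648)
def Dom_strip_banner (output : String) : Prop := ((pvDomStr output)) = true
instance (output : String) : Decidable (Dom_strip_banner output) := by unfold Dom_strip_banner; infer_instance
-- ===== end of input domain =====

-- B drops the banner prefix and joins the rest, instead of A's gated accumulator; objective: simpler.

-- ===== PORT A =====
-- the 'for line in lines' loop with its (started, result) state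
def pvLoopA : List String → Bool → List String → Bool × List String
  | [], started, result => (started, result)
  | line :: rest, started, result =>
    let started := if PySem.Str.isIn "HAMURABI" line && !started then true else started
    let result := if started then result ++ [line] else result
    pvLoopA rest started result

def strip_banner (output : String) : String :=
  let output := PySem.Str.replace output "\x07" ""
  let lines := (PySem.Str.split? output "\n").getD []   -- sep is the nonempty literal '\n', so split? = some
  PySem.Str.join "\n" (pvLoopA lines false []).2

-- ===== PORT B =====
-- the 'while lines and marker not in lines[0]: lines = lines[1:]' loop
def pvDropBanner : List String → List String
  | [] => []
  | l :: rest => if PySem.Str.isIn "HAMURABI" l then l :: rest else pvDropBanner rest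

def strip_banner_alt (output : String) : String :=
  let output := PySem.Str.replace output "\x07" ""
  let lines := (PySem.Str.split? output "\n").getD []   -- sep is the nonempty literal '\n', so split? = some
  PySem.Str.join "\n" (pvDropBanner lines)

-- ===== PRECONDITION & SPEC =====
def Spec_strip_banner (output : String) (out : String) : Prop := out = strip_banner_alt output
instance (output : String) (out : String) : Decidable (Spec_strip_banner output out) := by unfold Spec_strip_banner; infer_instance

-- ===== CLAIM (what is proved, stated in full; the proofs are below) =====
def Claim_equal_strip_banner : Prop := ∀ (output : String), Dom_strip_banner output → Spec_strip_banner output (strip_banner output)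

-- ===== LEMMAS AND PROOFS =====
theorem pvLoop_inv (lines : List String) (started : Bool) (result : List String) :
    (pvLoopA lines started result).2
    = result ++ (if started then lines else pvDropBanner lines) := by
  induction lines generalizing started result with
  | nil => simp [pvLoopA, pvDropBanner]
  | cons l rest ih =>
    cases started with
    | true => simp [pvLoopA, ih]
    | false =>
      cases h : PySem.Chars.isIn ['H','A','M','U','R','A','B','I'] l.toList with
      | true => simp [pvLoopA, PySem.Str.isIn, h, ih, pvDropBanner]
      | false => simp [pvLoopA, PySem.Str.isIn, h, ih, pvDropBanner]

-- ===== VERDICT (by name: the statement is the Claim_ definition above) =====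
theorem strip_banner_spec : Claim_equal_strip_banner := by
  intro output _
  unfold Spec_strip_banner strip_banner strip_banner_alt
  simp [pvLoop_inv]
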